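-- pv_equiv track=rewrite | github.com/Integrative-Transcriptomics/tss-captur-dsl2-with-RNAseq | nf/bin/scripts/TomsScripts/ExpressionScorer.py | FindFirstUpstreamTSS
-- ===== SOURCE A (Python) =====
-- def FindFirstUpstreamTSS(position, minimum_gene_length, tssList, strand):
--     lastPos = -1
--     if strand == '+':
--         for tss in tssList:
--             if(tss >= position):
--                 return lastPos
--
--             if(tss <= position - minimum_gene_length):
--                 lastPos = tss
--         return lastPos
--     else:
--         for tss in tssList:
--             if(tss > position + minimum_gene_length):
--                 return tss
--     return -1
-- ===== SOURCE B (Python) =====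
-- def FindFirstUpstreamTSS(position, minimum_gene_length, tssList, strand):
--     if strand == '+':
--         # take the prefix strictly before the first TSS >= position,
--         # then scan it back-to-front for the first (i.e. overall last) TSS
--         # leaving at least minimum_gene_length of room.
--         prefix = []
--         for t in tssList:
--             if t >= position:
--                 break
--             prefix.append(t)
--         for t in reversed(prefix):
--             if t <= position - minimum_gene_length:
--                 return t
--         return -1
--     return next((t for t in tssList if t > position + minimum_gene_length), -1)
-- ===== Notes on version B (the rewrite author's own statement) =====
-- stated objective: alternative
-- what changed: Replaces A's single forward pass with a last-candidate accumulator by a prefix-cut (take until first tss >= position) followed by a back-to-front scan for the first qualifying TSS, and a generator next() for the minus strand.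
import Mathlib
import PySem

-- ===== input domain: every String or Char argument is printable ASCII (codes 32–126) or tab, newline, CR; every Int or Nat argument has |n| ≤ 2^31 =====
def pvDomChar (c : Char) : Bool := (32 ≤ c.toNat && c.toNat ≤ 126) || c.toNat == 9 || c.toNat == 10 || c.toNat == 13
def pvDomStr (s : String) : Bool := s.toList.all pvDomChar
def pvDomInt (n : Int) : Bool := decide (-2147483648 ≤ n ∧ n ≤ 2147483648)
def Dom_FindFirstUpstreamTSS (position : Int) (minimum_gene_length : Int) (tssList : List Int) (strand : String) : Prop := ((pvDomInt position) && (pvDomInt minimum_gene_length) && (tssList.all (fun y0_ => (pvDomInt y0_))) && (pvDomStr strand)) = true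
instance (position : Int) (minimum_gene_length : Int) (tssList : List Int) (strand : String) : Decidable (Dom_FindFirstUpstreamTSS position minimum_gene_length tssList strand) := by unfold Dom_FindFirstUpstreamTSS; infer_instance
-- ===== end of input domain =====

-- B restates the plus-strand scan as prefix-cut + back-to-front search; same return value, alternative structure, same cost.

-- ===== PORT A =====
-- A's '+'-strand loop: carries lastPos, returns it at the first tss >= position.
def aPlusLoop (position minimum_gene_length : Int) : List Int → Int → Int
  | [], lastPos => lastPos
  | tss :: rest, lastPos =>
    if tss ≥ position then lastPos
    else aPlusLoop position minimum_gene_length rest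
      (if tss ≤ position - minimum_gene_length then tss else lastPos)

-- A's else-branch loop: returns the first tss > position + minimum_gene_length, else falls through to -1.
def aMinusLoop (position minimum_gene_length : Int) : List Int → Int
  | [] => -1
  | tss :: rest =>
    if tss > position + minimum_gene_length then tss
    else aMinusLoop position minimum_gene_length rest

def FindFirstUpstreamTSS (position : Int) (minimum_gene_length : Int) (tssList : List Int) (strand : String) : Int :=
  if strand = "+" then aPlusLoop position minimum_gene_length tssList (-1)
  else aMinusLoop position minimum_gene_length tssList

-- ===== PORT B =====
-- B's prefix loop: elements strictly before the first tss >= position.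
def bPrefix (position : Int) : List Int → List Int
  | [] => []
  | t :: rest => if t ≥ position then [] else t :: bPrefix position rest

def FindFirstUpstreamTSS_alt (position : Int) (minimum_gene_length : Int) (tssList : List Int) (strand : String) : Int :=
  if strand = "+" then
    (((bPrefix position tssList).reverse.find? (fun t => t ≤ position - minimum_gene_length)).getD (-1))
  else
    ((tssList.find? (fun t => t > position + minimum_gene_length)).getD (-1))

-- ===== PRECONDITION & SPEC =====
def Spec_FindFirstUpstreamTSS (position : Int) (minimum_gene_length : Int) (tssList : List Int) (strand : String) (out : Int) : Prop := out = FindFirstUpstreamTSS_alt position minimum_gene_length tssList strand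
instance (position : Int) (minimum_gene_length : Int) (tssList : List Int) (strand : String) (out : Int) : Decidable (Spec_FindFirstUpstreamTSS position minimum_gene_length tssList strand out) := by unfold Spec_FindFirstUpstreamTSS; infer_instance

-- ===== CLAIM (what is proved, stated in full; the proofs are below) =====
def Claim_equal_FindFirstUpstreamTSS : Prop := ∀ (position : Int) (minimum_gene_length : Int) (tssList : List Int) (strand : String), Dom_FindFirstUpstreamTSS position minimum_gene_length tssList strand → Spec_FindFirstUpstreamTSS position minimum_gene_length tssList strand (FindFirstUpstreamTSS position minimum_gene_length tssList strand)

-- ===== LEMMAS AND PROOFS =====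
theorem aPlusLoop_eq (position m : Int) (l : List Int) : ∀ (acc : Int),
    aPlusLoop position m l acc
      = ((bPrefix position l).reverse.find? (fun t => t ≤ position - m)).getD acc := by
  induction l with
  | nil => intro acc; simp [aPlusLoop, bPrefix]
  | cons t rest ih =>
    intro acc
    by_cases h : t ≥ position
    · simp [aPlusLoop, bPrefix, h]
    · simp only [aPlusLoop, bPrefix, if_neg h, List.reverse_cons, List.find?_append]
      rw [ih]
      cases hf : (bPrefix position rest).reverse.find? (fun t => t ≤ position - m) with
      | some x => simp
      | none =>
        by_cases hp : t ≤ position - m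
        · simp [List.find?, hp]
        · simp [List.find?, hp]

theorem aMinusLoop_eq (position m : Int) (l : List Int) :
    aMinusLoop position m l = (l.find? (fun t => t > position + m)).getD (-1) := by
  induction l with
  | nil => simp [aMinusLoop]
  | cons t rest ih =>
    by_cases h : t > position + m
    · simp [aMinusLoop, h, List.find?]
    · simp [aMinusLoop, h, List.find?, ih]

-- ===== VERDICT (by name: the statement is the Claim_ definition above) =====
theorem FindFirstUpstreamTSS_spec : Claim_equal_FindFirstUpstreamTSS := by
  intro position m tssList strand _
  unfold Spec_FindFirstUpstreamTSS FindFirstUpstreamTSS FindFirstUpstreamTSS_alt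
  by_cases hs : strand = "+"
  · simp [hs, aPlusLoop_eq]
  · simp [hs, aMinusLoop_eq]
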